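-- pv_equiv track=rewrite | github.com/fuji97/log4scan | log4scan.py | get_endpoints_from_entries
-- ===== SOURCE A (Python) =====
-- def get_endpoints_from_entries(entries, http, https):
--     endpoints = []
--     for entry in entries:
--         if entry.startswith("http://") or entry.startswith("https://"):
--             endpoints.append(entry)
--             break
--
--         if http:
--             endpoints.append("http://" + entry)
--         if https:
--             endpoints.append("https://" + entry)
--         if not http and not https:
--             endpoints.append("http://" + entry)
--             endpoints.append("https://" + entry)
--     return endpoints
-- ===== SOURCE B (Python) =====
-- def get_endpoints_from_entries(entries, http, https):
--     entries = list(entries)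
--     cut = next((i for i, e in enumerate(entries)
--                 if e.startswith(("http://", "https://"))), len(entries))
--     if http and not https:
--         schemes = ["http://"]
--     elif https and not http:
--         schemes = ["https://"]
--     else:
--         schemes = ["http://", "https://"]
--     endpoints = [s + e for e in entries[:cut] for s in schemes]
--     if cut < len(entries):
--         endpoints.append(entries[cut])
--     return endpoints
-- ===== Notes on version B (the rewrite author's own statement) =====
-- stated objective: alternative
-- what changed: Replaces the fused loop-with-break and per-entry flag tests by a cut-index search, a scheme list computed once, and a single comprehension over entries[:cut] plus a conditional append of the breaking entry.
import Mathlib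
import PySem

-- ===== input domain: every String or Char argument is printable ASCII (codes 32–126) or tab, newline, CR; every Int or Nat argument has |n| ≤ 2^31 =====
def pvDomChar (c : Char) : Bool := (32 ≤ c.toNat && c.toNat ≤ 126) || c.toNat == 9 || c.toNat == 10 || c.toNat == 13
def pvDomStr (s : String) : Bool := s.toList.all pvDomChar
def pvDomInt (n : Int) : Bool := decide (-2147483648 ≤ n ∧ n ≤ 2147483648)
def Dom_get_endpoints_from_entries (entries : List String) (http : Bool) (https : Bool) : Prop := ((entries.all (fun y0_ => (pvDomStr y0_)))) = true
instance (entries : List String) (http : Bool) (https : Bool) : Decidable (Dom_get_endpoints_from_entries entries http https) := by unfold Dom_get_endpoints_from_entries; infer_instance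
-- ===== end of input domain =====

-- B: cut-index search + scheme list built once + one comprehension, instead of A's fused loop with break (objective: alternative decomposition).
-- ===== PORT A =====
def get_endpoints_from_entries : List String → Bool → Bool → List String
  | [], _, _ => []
  | entry :: rest, http, https =>
    if PySem.Str.startswith entry "http://" || PySem.Str.startswith entry "https://" then
      [entry]  -- append and break
    else
      (if http then ["http://" ++ entry] else []) ++
      (if https then ["https://" ++ entry] else []) ++
      (if !http && !https then ["http://" ++ entry, "https://" ++ entry] else []) ++
      get_endpoints_from_entries rest http https

-- ===== PORT B =====
def pvIsAbs (e : String) : Bool :=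
  PySem.Str.startswith e "http://" || PySem.Str.startswith e "https://"

def get_endpoints_from_entries_alt (entries : List String) (http : Bool) (https : Bool) : List String :=
  let cut := (entries.findIdx? pvIsAbs).getD entries.length
  let schemes :=
    if http && !https then ["http://"]
    else if https && !http then ["https://"]
    else ["http://", "https://"]
  let endpoints := (entries.take cut).flatMap (fun e => schemes.map (fun s => s ++ e))
  if cut < entries.length then endpoints ++ [entries[cut]?.getD ""] else endpoints

-- ===== PRECONDITION & SPEC =====
def Spec_get_endpoints_from_entries (entries : List String) (http : Bool) (https : Bool) (out : List String) : Prop := out = get_endpoints_from_entries_alt entries http https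
instance (entries : List String) (http : Bool) (https : Bool) (out : List String) : Decidable (Spec_get_endpoints_from_entries entries http https out) := by unfold Spec_get_endpoints_from_entries; infer_instance

-- ===== CLAIM (what is proved, stated in full; the proofs are below) =====
def Claim_equal_get_endpoints_from_entries : Prop := ∀ (entries : List String) (http : Bool) (https : Bool), Dom_get_endpoints_from_entries entries http https → Spec_get_endpoints_from_entries entries http https (get_endpoints_from_entries entries http https)

-- ===== LEMMAS AND PROOFS =====


lemma alt_nil (http https : Bool) : get_endpoints_from_entries_alt [] http https = [] := by
  simp [get_endpoints_from_entries_alt]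

lemma alt_cons_abs (e : String) (rest : List String) (http https : Bool)
    (h : pvIsAbs e = true) :
    get_endpoints_from_entries_alt (e :: rest) http https = [e] := by
  simp [get_endpoints_from_entries_alt, List.findIdx?_cons, h]

lemma alt_cons_rel (e : String) (rest : List String) (http https : Bool)
    (h : pvIsAbs e = false) :
    get_endpoints_from_entries_alt (e :: rest) http https =
      ((if http && !https then ["http://"]
        else if https && !http then ["https://"]
        else ["http://", "https://"]).map (fun s => s ++ e)) ++
      get_endpoints_from_entries_alt rest http https := by
  unfold get_endpoints_from_entries_alt
  simp only [List.findIdx?_cons, h, if_neg Bool.false_ne_true]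
  cases hf : rest.findIdx? pvIsAbs with
  | none =>
    have hn : ∀ i (hi : i < rest.length), pvIsAbs rest[i] = false := by
      intro i hi
      have := List.findIdx?_eq_none_iff.mp hf
      simpa using this rest[i] (List.getElem_mem hi)
    simp [List.take_of_length_le (le_refl rest.length), List.flatMap_cons]
  | some j =>
    have hj : j < rest.length := by
      have := List.findIdx?_eq_some_iff_findIdx_eq.mp hf
      omega
    simp [hj, Nat.succ_lt_succ hj, List.flatMap_cons]

lemma a_step_prefixes (e : String) (http https : Bool) :
    ((if http then ["http://" ++ e] else []) ++
     (if https then ["https://" ++ e] else []) ++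
     (if !http && !https then ["http://" ++ e, "https://" ++ e] else [])) =
      ((if http && !https then ["http://"]
        else if https && !http then ["https://"]
        else ["http://", "https://"]).map (fun s => s ++ e)) := by
  cases http <;> cases https <;> simp

lemma ab_eq (entries : List String) (http https : Bool) :
    get_endpoints_from_entries entries http https =
      get_endpoints_from_entries_alt entries http https := by
  induction entries with
  | nil => simp [get_endpoints_from_entries, alt_nil]
  | cons e rest ih =>
    by_cases h : (PySem.Str.startswith e "http://" || PySem.Str.startswith e "https://") = true
    · rw [alt_cons_abs e rest http https h]
      unfold get_endpoints_from_entries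
      rw [if_pos h]
    · have h' : pvIsAbs e = false := by simpa [pvIsAbs] using h
      rw [alt_cons_rel e rest http https h']
      unfold get_endpoints_from_entries
      rw [if_neg h, ← a_step_prefixes e http https, ih]

-- ===== VERDICT (by name: the statement is the Claim_ definition above) =====
theorem get_endpoints_from_entries_spec : Claim_equal_get_endpoints_from_entries := by
  intro entries http https _
  unfold Spec_get_endpoints_from_entries
  exact ab_eq entries http https
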